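-- pv_equiv track=rewrite | github.com/vicramgonus/punctuator2tf2-vicramgon-plus | error_calculator.py | tokenize2
-- ===== SOURCE A (Python) =====
-- def tokenize2(input:str, puncts=[',', '.', ';', ':', '?', '!']):
--   # Inicializamos una lista vacía que contendrá, en cada paso, los tokens
--   # completos procesados hasta el momento.
--   res = []
--
--   # Se inicializa una cadena vacía que contendrá, en cada paso, la secuencia
--   # parcial de caractéres de la cadena del token en procesamiento.
--   partial = ''
--
--   # Reading type
--   cur_read_type = None
--
--   # En cada paso (hasta terminar de procesar todos los caracteres de la cadena)
--   for i in range(len(input)):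
--
--     # Se lee el carácter i-ésimo de la cadena
--     c_i = input[i]
--
--     # Si dicho carácter corresponde a un espacio o a un signo de puntuación
--     # entonces, el token que estábamos procesando finaliza, luego
--     if c_i in [' '] + puncts:
--
--       # Ha de añadirse (junto al signo de corte), como nuevos tokens.
--       # Sólo se añadirá no es vacío ( si no corresponde al espacio, resp.).
--       if partial:
--         res.append(partial)
--
--       res.append(c_i)
--
--       # Y reseteamos la cadena parcial de token a vacío
--       partial = ''
--       cur_read_type = None
--
--     # En otro caso,
--     else:
--       # Añadimos el carácter a la cadena parcial del token procesamiento
--       # si los tipos no coinciden entendemos que corresponden a cadenas distintas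
--
--       if (c_i.isdigit()):
--           if(cur_read_type == 'string'):
--             res += [partial]
--             partial = ''
--
--           cur_read_type = 'number'
--
--       else:
--           if(cur_read_type == 'number'):
--             res += [partial]
--             partial = ''
--
--           cur_read_type = 'string'
--
--
--       partial += c_i
--
--     #Y continúa el procesamiento del siguiente carácter.
--
--   # El token leído en última instancia es añadido a la lista de tokens (siempre
--   # que no sea vacío)
--   res += [partial] if partial.strip() != '' else []
--
--   # Finalmente, se devuelve la lista de tokens
--   return res
-- ===== SOURCE B (Python) =====
-- def tokenize2(input: str, puncts=[',', '.', ';', ':', '?', '!']):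
--   seps = set(puncts)
--   seps.add(' ')
--
--   def cls(c):
--     # 0 = separator, 1 = digit, 2 = other
--     if c in seps:
--       return 0
--     return 1 if c.isdigit() else 2
--
--   res = []
--   n = len(input)
--   i = 0
--   while i < n:
--     k = cls(input[i])
--     if k == 0:
--       res.append(input[i])
--       i += 1
--     else:
--       j = i + 1
--       while j < n and cls(input[j]) == k:
--         j += 1
--       res.append(input[i:j])
--       i = j
--   if res and cls(input[-1]) != 0 and res[-1].strip() == '':
--     res.pop()
--   return res
-- ===== Notes on version B (the rewrite author's own statement) =====
-- stated objective: faster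
-- what changed: Replaces A's character-by-character state machine (partial-token accumulator with a cur_read_type flag and flush logic in three branches, rebuilding the [' ']+puncts list per character and growing partial by string concatenation) by a two-pointer scanner over a precomputed separator set that emits each maximal same-class run as one slice, with a single final pop of a whitespace-only trailing token.
import Mathlib
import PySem

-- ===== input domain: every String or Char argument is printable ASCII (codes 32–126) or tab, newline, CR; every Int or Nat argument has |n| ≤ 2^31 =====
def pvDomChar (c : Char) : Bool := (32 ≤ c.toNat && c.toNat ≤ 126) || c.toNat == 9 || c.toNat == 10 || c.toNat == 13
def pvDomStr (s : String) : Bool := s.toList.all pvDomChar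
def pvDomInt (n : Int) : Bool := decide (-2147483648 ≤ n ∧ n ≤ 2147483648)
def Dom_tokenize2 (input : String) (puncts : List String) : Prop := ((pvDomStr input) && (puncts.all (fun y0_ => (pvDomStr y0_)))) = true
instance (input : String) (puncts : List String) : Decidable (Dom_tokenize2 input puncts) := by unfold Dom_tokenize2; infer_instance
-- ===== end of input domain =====

-- B replaces A's char-by-char accumulator state machine by a maximal-run two-pointer scanner; same return value (neither mutates its arguments).

-- ===== PORT A =====
-- A's loop state: (res, partial as a char list, cur_read_type: none | some true ("number") | some false ("string")).
def pvStepA (puncts : List String) (st : List String × List Char × Option Bool) (c : Char) :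
    List String × List Char × Option Bool :=
  match st with
  | (res, pa, crt) =>
    if String.ofList [c] ∈ " " :: puncts then
      ((if pa ≠ [] then res ++ [String.ofList pa] else res) ++ [String.ofList [c]], [], none)
    else if PySem.Chars.isdigit c then
      if crt = some false then (res ++ [String.ofList pa], [c], some true)
      else (res, pa ++ [c], some true)
    else
      if crt = some true then (res ++ [String.ofList pa], [c], some false)
      else (res, pa ++ [c], some false)

def tokenize2 (input : String) (puncts : List String) : List String :=
  let fin := input.toList.foldl (pvStepA puncts) ([], [], none)
  fin.1 ++ (if PySem.Chars.strip fin.2.1 ≠ [] then [String.ofList fin.2.1] else [])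

-- ===== PORT B =====
-- seps = set(puncts) with ' ' added
def pvSeps (puncts : List String) : PySem.Set String :=
  PySem.Set.add (PySem.Set.ofList puncts) " "

-- 0 = separator, 1 = digit, 2 = other
def pvClsB (seps : PySem.Set String) (c : Char) : Nat :=
  if PySem.Set.contains seps (String.ofList [c]) then 0
  else if PySem.Chars.isdigit c then 1 else 2

-- the two-pointer loop: a separator is its own token, otherwise emit the maximal run of the same class
def pvScanB (seps : PySem.Set String) : List Char → List String
  | [] => []
  | c :: rest =>
    let k := pvClsB seps c
    if k = 0 then String.ofList [c] :: pvScanB seps rest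
    else String.ofList (c :: rest.takeWhile (fun d => pvClsB seps d = k)) ::
         pvScanB seps (rest.dropWhile (fun d => pvClsB seps d = k))
termination_by l => l.length
decreasing_by
  · simp
  · have := List.length_dropWhile_le (fun d => pvClsB seps d = k) rest
    simp; omega

def tokenize2_alt (input : String) (puncts : List String) : List String :=
  let seps := pvSeps puncts
  let res := pvScanB seps input.toList
  match res.getLast?, input.toList.getLast? with
  | some t, some c =>
    if pvClsB seps c ≠ 0 ∧ PySem.Str.strip t = "" then res.dropLast else res
  | _, _ => res

-- ===== PRECONDITION & SPEC =====
def Spec_tokenize2 (input : String) (puncts : List String) (out : List String) : Prop := out = tokenize2_alt input puncts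
instance (input : String) (puncts : List String) (out : List String) : Decidable (Spec_tokenize2 input puncts out) := by unfold Spec_tokenize2; infer_instance

-- ===== CLAIM (what is proved, stated in full; the proofs are below) =====
def Claim_equal_tokenize2 : Prop := ∀ (input : String) (puncts : List String), Dom_tokenize2 input puncts → Spec_tokenize2 input puncts (tokenize2 input puncts)

-- ===== LEMMAS AND PROOFS =====

-- Simulation of A's loop with the pending run made explicit: pend = some (p, b) means
-- a nonempty partial p of class b (true = digit) is open; returns (emitted tokens, final pend).
def pvSim (puncts : List String) : List Char → Option (List Char × Bool) → List String × Option (List Char × Bool)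
  | [], pend => ([], pend)
  | c :: l, pend =>
    if String.ofList [c] ∈ " " :: puncts then
      let r := pvSim puncts l none
      ((match pend with | some (p, _) => [String.ofList p] | none => []) ++ String.ofList [c] :: r.1, r.2)
    else
      let b := PySem.Chars.isdigit c
      match pend with
      | some (p, bp) =>
        if bp = b then pvSim puncts l (some (p ++ [c], b))
        else
          let r := pvSim puncts l (some ([c], b))
          (String.ofList p :: r.1, r.2)
      | none => pvSim puncts l (some ([c], b))

def pvPendP (pend : Option (List Char × Bool)) : List Char :=
  match pend with | some (p, _) => p | none => []

def pvPendC (pend : Option (List Char × Bool)) : Option Bool :=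
  match pend with | some (_, b) => some b | none => none

def pvPendTok (pend : Option (List Char × Bool)) : List String :=
  match pend with | some (p, _) => [String.ofList p] | none => []

lemma pvFold_eq (puncts : List String) (l : List Char) :
    ∀ (res : List String) (pend : Option (List Char × Bool)),
      (∀ p b, pend = some (p, b) → p ≠ []) →
      l.foldl (pvStepA puncts) (res, pvPendP pend, pvPendC pend) =
        (res ++ (pvSim puncts l pend).1, pvPendP (pvSim puncts l pend).2, pvPendC (pvSim puncts l pend).2) := by
  induction l with
  | nil => intro res pend hp; simp [pvSim]
  | cons c l ih =>
    intro res pend hp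
    simp only [List.foldl_cons]
    by_cases hc : String.ofList [c] ∈ " " :: puncts
    · cases pend with
      | none =>
        rw [show pvStepA puncts (res, pvPendP none, pvPendC none) c
              = (res ++ [String.ofList [c]], pvPendP none, pvPendC none) from by
            simp [pvStepA, pvPendP, pvPendC, hc]]
        rw [ih (res ++ [String.ofList [c]]) none (by intro p b h; cases h)]
        simp [pvSim, hc]
      | some pb =>
        obtain ⟨p, b⟩ := pb
        have hpne : p ≠ [] := hp p b rfl
        rw [show pvStepA puncts (res, pvPendP (some (p, b)), pvPendC (some (p, b))) c
              = (res ++ [String.ofList p] ++ [String.ofList [c]], pvPendP none, pvPendC none) from by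
            simp [pvStepA, pvPendP, pvPendC, hc, hpne]]
        rw [ih (res ++ [String.ofList p] ++ [String.ofList [c]]) none (by intro p b h; cases h)]
        simp [pvSim, hc]
    · cases pend with
      | none =>
        rw [show pvStepA puncts (res, pvPendP none, pvPendC none) c
              = (res, pvPendP (some ([c], PySem.Chars.isdigit c)),
                 pvPendC (some ([c], PySem.Chars.isdigit c))) from by
            cases hb : PySem.Chars.isdigit c <;>
              simp [pvStepA, pvPendP, pvPendC, hc, hb]]
        rw [ih res (some ([c], PySem.Chars.isdigit c)) (by intro p b h; cases h; simp)]
        simp [pvSim, hc]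
      | some pb =>
        obtain ⟨p, bp⟩ := pb
        by_cases hbp : bp = PySem.Chars.isdigit c
        · rw [show pvStepA puncts (res, pvPendP (some (p, bp)), pvPendC (some (p, bp))) c
                = (res, pvPendP (some (p ++ [c], PySem.Chars.isdigit c)),
                   pvPendC (some (p ++ [c], PySem.Chars.isdigit c))) from by
              cases hb : PySem.Chars.isdigit c <;> subst hbp <;>
                simp [pvStepA, pvPendP, pvPendC, hc, hb]]
          rw [ih res (some (p ++ [c], PySem.Chars.isdigit c)) (by intro q b h; cases h; simp)]
          simp [pvSim, hc, hbp]
        · rw [show pvStepA puncts (res, pvPendP (some (p, bp)), pvPendC (some (p, bp))) c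
                = (res ++ [String.ofList p], pvPendP (some ([c], PySem.Chars.isdigit c)),
                   pvPendC (some ([c], PySem.Chars.isdigit c))) from by
              cases hb : PySem.Chars.isdigit c <;> cases bp <;> simp_all <;>
                simp [pvStepA, pvPendP, pvPendC, hc, hb]]
          rw [ih (res ++ [String.ofList p]) (some ([c], PySem.Chars.isdigit c))
               (by intro q b h; cases h; simp)]
          simp [pvSim, hc, hbp]

lemma pvContains_seps (puncts : List String) (s : String) :
    PySem.Set.contains (pvSeps puncts) s = decide (s ∈ " " :: puncts) := by
  have h1 := PySem.Set.mem_add (PySem.Set.ofList puncts) " " s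
  have h2 := PySem.Set.mem_ofList puncts s
  simp only [pvSeps, PySem.Set.contains]
  rw [Bool.eq_iff_iff]
  simp only [List.contains_iff_mem, decide_eq_true_eq, h1, h2, List.mem_cons]
  tauto

lemma pvClsB_eq (puncts : List String) (c : Char) :
    pvClsB (pvSeps puncts) c
      = if String.ofList [c] ∈ " " :: puncts then 0
        else if PySem.Chars.isdigit c then 1 else 2 := by
  simp only [pvClsB, pvContains_seps, decide_eq_true_eq, List.mem_cons]

lemma pvRL_nil : PySem.Chars.rstrip (PySem.Chars.lstrip []) = [] := by decide

lemma pvSim_eq_scan (puncts : List String) (l : List Char) :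
    ∀ pend, (pvSim puncts l pend).1 ++ pvPendTok (pvSim puncts l pend).2 =
      (match pend with
       | none => pvScanB (pvSeps puncts) l
       | some (p, b) =>
           String.ofList (p ++ l.takeWhile (fun d => pvClsB (pvSeps puncts) d = (if b then 1 else 2))) ::
           pvScanB (pvSeps puncts) (l.dropWhile (fun d => pvClsB (pvSeps puncts) d = (if b then 1 else 2)))) := by
  induction l with
  | nil =>
    intro pend
    cases pend with
    | none => simp [pvSim, pvPendTok, pvScanB]
    | some pb => obtain ⟨p, b⟩ := pb; simp [pvSim, pvPendTok, pvScanB]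
  | cons c l ih =>
    intro pend
    by_cases hc : String.ofList [c] ∈ " " :: puncts
    · have hc0 : pvClsB (pvSeps puncts) c = 0 := by simp [pvClsB_eq, hc]
      have hscan : pvScanB (pvSeps puncts) (c :: l)
          = String.ofList [c] :: pvScanB (pvSeps puncts) l := by
        rw [pvScanB]; simp [hc0]
      have h2 := ih none
      simp only at h2
      cases pend with
      | none =>
        simp only [pvSim, if_pos hc, hscan]
        simp [h2]
      | some pb =>
        obtain ⟨p, b⟩ := pb
        have hne : pvClsB (pvSeps puncts) c ≠ (if b then 1 else 2) := by
          rw [hc0]; cases b <;> simp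
        simp only [pvSim, if_pos hc, List.takeWhile_cons, List.dropWhile_cons]
        simp [hne, hscan, h2]
    · have hck : pvClsB (pvSeps puncts) c = (if PySem.Chars.isdigit c then 1 else 2) := by
        simp [pvClsB_eq, hc]
      have hk0 : pvClsB (pvSeps puncts) c ≠ 0 := by rw [hck]; cases PySem.Chars.isdigit c <;> simp
      have hscan : pvScanB (pvSeps puncts) (c :: l)
          = String.ofList (c :: l.takeWhile (fun d => pvClsB (pvSeps puncts) d = pvClsB (pvSeps puncts) c)) ::
            pvScanB (pvSeps puncts) (l.dropWhile (fun d => pvClsB (pvSeps puncts) d = pvClsB (pvSeps puncts) c)) := by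
        rw [pvScanB]; simp [hk0]
      rw [hck] at hscan
      cases pend with
      | none =>
        have h2 := ih (some ([c], PySem.Chars.isdigit c))
        simp only at h2
        simp only [pvSim, if_neg hc]
        rw [h2, hscan]
        simp
      | some pb =>
        obtain ⟨p, bp⟩ := pb
        by_cases hbp : bp = PySem.Chars.isdigit c
        · have h2 := ih (some (p ++ [c], PySem.Chars.isdigit c))
          simp only at h2
          simp only [pvSim, if_neg hc, List.takeWhile_cons, List.dropWhile_cons]
          simp [hbp, hck, h2]
        · have hkk : pvClsB (pvSeps puncts) c ≠ (if bp then 1 else 2) := by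
            rw [hck]; cases bp <;> cases hb : PySem.Chars.isdigit c <;> simp_all
          have h2 := ih (some ([c], PySem.Chars.isdigit c))
          simp only at h2
          simp only [pvSim, if_neg hc, List.takeWhile_cons, List.dropWhile_cons]
          simp [hbp, hkk, hscan, h2]

lemma pvSim_pend_last (puncts : List String) (l : List Char) (c : Char) :
    ∀ pend, (pvSim puncts (l ++ [c]) pend).2 = none ↔ String.ofList [c] ∈ " " :: puncts := by
  induction l with
  | nil =>
    intro pend
    by_cases hc : String.ofList [c] ∈ " " :: puncts
    · cases pend with
      | none => simp [pvSim, hc]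
      | some pb => obtain ⟨p, b⟩ := pb; simp [pvSim, hc]
    · cases pend with
      | none => simp [pvSim, hc]
      | some pb =>
        obtain ⟨p, bp⟩ := pb
        by_cases hbp : bp = PySem.Chars.isdigit c <;> simp [pvSim, hc, hbp]
  | cons d l ih =>
    intro pend
    by_cases hd : String.ofList [d] ∈ " " :: puncts
    · cases pend with
      | none => simpa [pvSim, hd] using ih none
      | some pb => obtain ⟨p, b⟩ := pb; simpa [pvSim, hd] using ih none
    · cases pend with
      | none => simpa [pvSim, hd] using ih (some ([d], PySem.Chars.isdigit d))
      | some pb =>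
        obtain ⟨p, bp⟩ := pb
        by_cases hbp : bp = PySem.Chars.isdigit d
        · simpa [pvSim, hd, hbp] using ih (some (p ++ [d], PySem.Chars.isdigit d))
        · simpa [pvSim, hd, hbp] using ih (some ([d], PySem.Chars.isdigit d))

lemma pvStrip_ofList_eq_empty (p : List Char) :
    PySem.Str.strip (String.ofList p) = "" ↔ PySem.Chars.strip p = [] := by
  rw [show (PySem.Str.strip (String.ofList p) = "")
        ↔ (PySem.Str.strip (String.ofList p)).toList = [] from Iff.symm String.toList_eq_nil_iff]
  rw [PySem.Str.toList_strip]
  simp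

-- ===== VERDICT (by name: the statement is the Claim_ definition above) =====
theorem tokenize2_spec : Claim_equal_tokenize2 := by
  unfold Claim_equal_tokenize2
  intro input puncts _
  unfold Spec_tokenize2
  rcases List.eq_nil_or_concat' input.toList with h | ⟨L, c, h⟩
  · simp [tokenize2, tokenize2_alt, h, pvScanB, PySem.Chars.strip, pvRL_nil]
  · have hfold := pvFold_eq puncts (L ++ [c]) [] none (by intro p b hh; cases hh)
    have hscan := pvSim_eq_scan puncts (L ++ [c]) none
    simp only at hscan
    have hlast := pvSim_pend_last puncts L c none
    have hA : tokenize2 input puncts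
        = (pvSim puncts (L ++ [c]) none).1 ++
          (if PySem.Chars.strip (pvPendP (pvSim puncts (L ++ [c]) none).2) ≠ []
           then [String.ofList (pvPendP (pvSim puncts (L ++ [c]) none).2)] else []) := by
      simp only [tokenize2, h]
      rw [show (([] : List String), ([] : List Char), (none : Option Bool))
            = (([] : List String), pvPendP none, pvPendC none) from rfl]
      rw [hfold]
      simp
    have hB : tokenize2_alt input puncts
        = (match (pvScanB (pvSeps puncts) (L ++ [c])).getLast?, (some c : Option Char) with
           | some t, some c' =>
             if pvClsB (pvSeps puncts) c' ≠ 0 ∧ PySem.Str.strip t = ""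
             then (pvScanB (pvSeps puncts) (L ++ [c])).dropLast
             else pvScanB (pvSeps puncts) (L ++ [c])
           | _, _ => pvScanB (pvSeps puncts) (L ++ [c])) := by
      simp only [tokenize2_alt, h, List.getLast?_concat]
    by_cases hc : String.ofList [c] ∈ " " :: puncts
    · have hp : (pvSim puncts (L ++ [c]) none).2 = none := hlast.mpr hc
      have hc0 : pvClsB (pvSeps puncts) c = 0 := by simp [pvClsB_eq, hc]
      rw [hA, hB, hp]
      rw [hp] at hscan
      simp only [pvPendTok, List.append_nil] at hscan
      simp only [pvPendP]
      cases hg : (pvScanB (pvSeps puncts) (L ++ [c])).getLast? with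
      | none => simp [hscan, PySem.Chars.strip, pvRL_nil]
      | some t => simp [hscan, hc0, PySem.Chars.strip, pvRL_nil]
    · have hp : (pvSim puncts (L ++ [c]) none).2 ≠ none := fun hn => hc (hlast.mp hn)
      obtain ⟨⟨p, b⟩, hpb⟩ : ∃ pb, (pvSim puncts (L ++ [c]) none).2 = some pb := by
        cases hpp : (pvSim puncts (L ++ [c]) none).2 with
        | none => exact absurd hpp hp
        | some pb => exact ⟨pb, rfl⟩
      have hck : pvClsB (pvSeps puncts) c ≠ 0 := by
        simp only [pvClsB_eq, if_neg hc]
        cases PySem.Chars.isdigit c <;> simp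
      rw [hpb] at hscan
      simp only [pvPendTok] at hscan
      have hres : pvScanB (pvSeps puncts) (L ++ [c])
          = (pvSim puncts (L ++ [c]) none).1 ++ [String.ofList p] := hscan.symm
      rw [hA, hB, hpb, hres]
      simp only [pvPendP, List.getLast?_concat, List.dropLast_concat]
      by_cases hs : PySem.Chars.strip p = []
      · have : PySem.Str.strip (String.ofList p) = "" := (pvStrip_ofList_eq_empty p).mpr hs
        simp [hck, this, hs]
      · have : ¬ PySem.Str.strip (String.ofList p) = "" := fun hh => hs ((pvStrip_ofList_eq_empty p).mp hh)
        simp [hck, this, hs]
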